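-- pv_equiv track=rewrite | github.com/greenmonn/daily-coding | python/baekjun/14889_start_link.py | solution
-- ===== SOURCE A (Python) =====
-- import itertools
--
-- def solution(S, N):
--     num_members = N // 2
--
--     teams = range(N)
--
--     start_teams_candidates = itertools.combinations(range(N), num_members)
--
--     min_ability_diff = 10*10
--
--     def calc_abilities(members):
--         sum = 0
--         for member in members:
--             other_members = list(members[:])
--             other_members.remove(member)
--             for other in other_members:
--                 sum += S[member][other]
--         return sum
--     all_members = set(range(N))
--     for start_team_members in start_teams_candidates:
--
--         link_team_members = list(all_members - set(start_team_members))
--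
--         start_team_ability = calc_abilities(start_team_members)
--         link_team_ability = calc_abilities(link_team_members)
--
--         diff = abs(start_team_ability - link_team_ability)
--
--         if diff < min_ability_diff:
--             min_ability_diff = diff
--
--     return min_ability_diff
-- ===== SOURCE B (Python) =====
-- def solution(S, N):
--     # Backtracking DFS: each person joins start (while slots remain) or link,
--     # accumulating each team's pairwise ability incrementally.
--     k = N // 2
--     best = 100
--
--     def dfs(i, start, link, sa, sl):
--         nonlocal best
--         if i == N:
--             d = abs(sa - sl)
--             if d < best:
--                 best = d
--             return
--         if len(start) < k:
--             add = sum(S[i][q] + S[q][i] for q in start)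
--             start.append(i)
--             dfs(i + 1, start, link, sa + add, sl)
--             start.pop()
--         if i - len(start) < N - k:
--             add = sum(S[i][q] + S[q][i] for q in link)
--             link.append(i)
--             dfs(i + 1, start, link, sa, sl + add)
--             link.pop()
--
--     dfs(0, [], [], 0, 0)
--     return best
-- ===== Notes on version B (the rewrite author's own statement) =====
-- stated objective: faster
-- what changed: Replaced the itertools.combinations enumeration that recomputes each team's ability from scratch (with list copies and list.remove) by a recursive backtracking DFS over persons 0..N-1 that assigns each person to the start or link team under count guards and accumulates each team's pairwise ability incrementally, keeping A's running-minimum update and its initial value 100.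
import Mathlib
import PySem

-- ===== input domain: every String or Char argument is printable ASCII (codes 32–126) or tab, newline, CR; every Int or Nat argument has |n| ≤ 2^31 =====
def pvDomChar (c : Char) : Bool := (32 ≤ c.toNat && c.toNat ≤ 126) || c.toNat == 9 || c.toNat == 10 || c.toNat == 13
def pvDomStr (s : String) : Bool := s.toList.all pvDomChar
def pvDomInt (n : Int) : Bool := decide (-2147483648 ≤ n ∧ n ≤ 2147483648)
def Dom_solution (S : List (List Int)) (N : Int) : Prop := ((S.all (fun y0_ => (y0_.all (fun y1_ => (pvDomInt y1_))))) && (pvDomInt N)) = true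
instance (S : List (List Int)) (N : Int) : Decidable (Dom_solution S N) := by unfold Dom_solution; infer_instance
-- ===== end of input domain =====

-- B replaces A's combinations enumeration (which recomputes each team's ability from
-- scratch) by a backtracking DFS with incremental pairwise ability sums; same results.

-- ===== PORT A =====
-- S[m][o] (indices valid under Pre_solution; Python raises on an out-of-range index, excluded by Pre_)
def pvSg (S : List (List Int)) (m o : Int) : Int :=
  PySem.List.pyGetD (PySem.List.pyGetD S m []) o 0

-- calc_abilities: for each member, sum S[member][other] over members with `member` removed
def pvAbil (S : List (List Int)) (members : List Int) : Int :=
  members.foldl (fun acc m =>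
    ((PySem.List.remove? members m).getD []).foldl (fun a o => a + pvSg S m o) acc) 0

def solution (S : List (List Int)) (N : Int) : Int :=
  let numMembers := (PySem.Int.floordiv N 2).toNat
  let teams := PySem.List.pyRange 0 N 1
  (PySem.List.combinations teams numMembers).foldl (fun mn st =>
    let link := teams.filter (fun x => !(st.contains x))
    let diff := |pvAbil S st - pvAbil S link|
    if diff < mn then diff else mn) (10*10)

-- ===== PORT B =====
-- sum(S[i][q] + S[q][i] for q in team)
def pvAdd (S : List (List Int)) (i : Int) (team : List Int) : Int :=
  team.foldl (fun a q => a + (pvSg S i q + pvSg S q i)) 0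

-- dfs(i, start, link, sa, sl) with the running minimum `best` threaded through;
-- fuel = the number of persons still to assign, so the recursion is structural
def pvDfs (S : List (List Int)) (N : Int) (k : Nat) :
    Nat → Int → List Int → List Int → Int → Int → Int → Int
  | 0, i, _st, _lk, sa, sl, best =>
      if i = N then (let d := |sa - sl|; if d < best then d else best) else best
  | fuel+1, i, st, lk, sa, sl, best =>
      if i = N then (let d := |sa - sl|; if d < best then d else best)
      else
        let b1 := if st.length < k then
            pvDfs S N k fuel (i+1) (st ++ [i]) lk (sa + pvAdd S i st) sl best
          else best
        if i - (st.length : Int) < N - (k : Int) then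
          pvDfs S N k fuel (i+1) st (lk ++ [i]) sa (sl + pvAdd S i lk) b1
        else b1

def solution_alt (S : List (List Int)) (N : Int) : Int :=
  let k := (PySem.Int.floordiv N 2).toNat
  pvDfs S N k N.toNat 0 [] [] 0 0 100

-- ===== PRECONDITION & SPEC =====
-- Pre_solution = exactly the inputs on which the Python A returns: N ≥ 0 (a negative N makes
-- itertools.combinations raise ValueError) and, when N ≥ 3 (some team has ≥ 2 members, so
-- every entry S[m][o] with m ≠ o, both < N, is read), all those indices are in range:
-- N ≤ len(S) and row m has length ≥ N, except row N-1 which only needs length ≥ N-1.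
def Pre_solution (S : List (List Int)) (N : Int) : Prop :=
  0 ≤ N ∧ (N ≤ 2 ∨ (N ≤ (S.length : Int) ∧ ∀ p ∈ S.zipIdx, (p.2 : Int) < N →
    (if (p.2 : Int) = N - 1 then N - 1 else N) ≤ (p.1.length : Int)))
instance (S : List (List Int)) (N : Int) : Decidable (Pre_solution S N) := by
  unfold Pre_solution; infer_instance

def pvWitness_solution : List (List Int) × Int := ([[0, 1, 2], [3, 0, 4], [5, 6, 0]], 3)

def Spec_solution (S : List (List Int)) (N : Int) (out : Int) : Prop := out = solution_alt S N
instance (S : List (List Int)) (N : Int) (out : Int) : Decidable (Spec_solution S N out) := by unfold Spec_solution; infer_instance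

-- ===== CLAIM (what is proved, stated in full; the proofs are below) =====
def Claim_equal_solution : Prop := ∀ (S : List (List Int)) (N : Int), Dom_solution S N → Pre_solution S N → Spec_solution S N (solution S N)

-- ===== LEMMAS AND PROOFS =====

-- the body of A's candidate loop, applied to one start team
def pvStep (S : List (List Int)) (N : Int) (mn : Int) (st : List Int) : Int :=
  let link := (PySem.List.pyRange 0 N 1).filter (fun x => !(st.contains x))
  let diff := |pvAbil S st - pvAbil S link|
  if diff < mn then diff else mn

theorem pvAdd_eq_sum (S : List (List Int)) (p : Int) (T : List Int) :
    pvAdd S p T = (T.map (fun q => pvSg S p q + pvSg S q p)).sum := by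
  unfold pvAdd
  rw [PySem.List.foldl_add]
  simp

theorem pvAbil_eq_sum (S : List (List Int)) (T : List Int) :
    pvAbil S T = (T.map (fun m => ((T.erase m).map (fun o => pvSg S m o)).sum)).sum := by
  unfold pvAbil
  rw [PySem.List.foldl_congr_mem' T
      (fun acc m => ((PySem.List.remove? T m).getD []).foldl (fun a o => a + pvSg S m o) acc)
      (fun acc m => acc + ((T.erase m).map (fun o => pvSg S m o)).sum) 0
      (by intro m hm acc
          simp only
          rw [PySem.List.remove?_eq_some_erase T m hm, Option.getD_some,
            PySem.List.foldl_add])]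
  rw [PySem.List.foldl_add]
  simp

theorem pvAbil_append (S : List (List Int)) (T : List Int) (p : Int) (hp : p ∉ T) :
    pvAbil S (T ++ [p]) = pvAbil S T + pvAdd S p T := by
  rw [pvAbil_eq_sum, pvAbil_eq_sum, pvAdd_eq_sum]
  rw [List.map_append, List.sum_append]
  have h2 : ((T ++ [p]).erase p) = T := by
    rw [List.erase_append_right _ hp]; simp
  rw [List.map_congr_left (fun m hm => by
    rw [List.erase_append_left _ hm, List.map_append, List.sum_append])]
  simp only [List.map_singleton, h2, List.sum_cons, List.sum_nil, add_zero]
  simp only [List.sum_map_add]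
  ring

theorem pvFilter_succ_mem (st : List Int) (i : Int) (h0 : 0 ≤ i) (hi : i ∉ st) :
    (PySem.List.pyRange 0 (i+1) 1).filter (fun x => !(st.contains x))
      = ((PySem.List.pyRange 0 i 1).filter (fun x => !(st.contains x))) ++ [i] := by
  rw [PySem.List.pyRange_one_succ_right h0, List.filter_append]
  simp [hi]

theorem pvFilter_succ_snoc (st : List Int) (i : Int) (h0 : 0 ≤ i)
    (hst : ∀ x ∈ st, x < i) :
    (PySem.List.pyRange 0 (i+1) 1).filter (fun x => !((st ++ [i]).contains x))
      = (PySem.List.pyRange 0 i 1).filter (fun x => !(st.contains x)) := by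
  rw [PySem.List.pyRange_one_succ_right h0, List.filter_append]
  have h1 : List.filter (fun x => !((st ++ [i]).contains x)) (PySem.List.pyRange 0 i 1)
      = List.filter (fun x => !(st.contains x)) (PySem.List.pyRange 0 i 1) :=
    List.filter_congr (fun x hx => by
      have hxi : x < i := (PySem.List.mem_pyRange_one.mp hx).2
      have hne : ¬ x = i := by omega
      simp [hne])
  rw [h1]
  simp

theorem pvDfs_eq (S : List (List Int)) (N : Int) (k : Nat) :
    ∀ (m : Nat) (i : Int) (st : List Int) (best : Int),
      0 ≤ i → i + (m : Int) = N →
      (∀ x ∈ st, 0 ≤ x ∧ x < i) →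
      k - st.length ≤ m →
      pvDfs S N k m i st ((PySem.List.pyRange 0 i 1).filter (fun x => !(st.contains x)))
        (pvAbil S st)
        (pvAbil S ((PySem.List.pyRange 0 i 1).filter (fun x => !(st.contains x)))) best
      = (PySem.List.combinations (PySem.List.pyRange i N 1) (k - st.length)).foldl
          (fun b c => pvStep S N b (st ++ c)) best := by
  intro m
  induction m with
  | zero =>
    intro i st best h0 hiN hst hk
    have hi : i = N := by omega
    have hr : k - st.length = 0 := Nat.le_zero.mp hk
    rw [hr, hi, PySem.List.pyRange_one_eq_nil (le_refl N), PySem.List.combinations_zero]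
    simp [pvDfs, pvStep]
  | succ m ih =>
    intro i st best h0 hiN hst hk
    have hiltN : i < N := by omega
    have hinotst : i ∉ st := fun h => by have := (hst i h).2; omega
    have hlknoti : i ∉ (PySem.List.pyRange 0 i 1).filter (fun x => !(st.contains x)) := by
      intro h
      have := (PySem.List.mem_pyRange_one.mp (List.mem_of_mem_filter h)).2
      omega
    rw [PySem.List.pyRange_one_cons hiltN]
    simp only [pvDfs]
    rw [if_neg (show ¬ i = N by omega)]
    by_cases hlt : st.length < k
    · -- start branch taken
      rw [if_pos hlt]
      have hr : k - st.length = (k - (st.length + 1)) + 1 := by omega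
      rw [hr, PySem.List.combinations_cons_succ, List.foldl_append, List.foldl_map]
      have hb1 :
          pvDfs S N k m (i+1) (st ++ [i])
            ((PySem.List.pyRange 0 i 1).filter (fun x => !(st.contains x)))
            (pvAbil S st + pvAdd S i st)
            (pvAbil S ((PySem.List.pyRange 0 i 1).filter (fun x => !(st.contains x)))) best
          = (PySem.List.combinations (PySem.List.pyRange (i+1) N 1) (k - (st.length + 1))).foldl
              (fun b c => pvStep S N b (st ++ i :: c)) best := by
        rw [← pvAbil_append S st i hinotst,
          ← pvFilter_succ_snoc st i h0 (fun x hx => (hst x hx).2)]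
        have hih := ih (i+1) (st ++ [i]) best (by omega) (by omega)
          (by intro x hx
              rcases List.mem_append.mp hx with h | h
              · exact ⟨(hst x h).1, by have := (hst x h).2; omega⟩
              · simp at h; constructor <;> omega)
          (by simp only [List.length_append, List.length_cons, List.length_nil]; omega)
        simp only [List.length_append, List.length_cons, List.length_nil] at hih
        rw [hih]
        exact PySem.List.foldl_congr_mem' _ _ _ _
          (fun c _ b => by rw [show (st ++ [i]) ++ c = st ++ i :: c by simp])
      rw [hb1]
      by_cases hg : i - (st.length : Int) < N - (k : Int)
      · rw [if_pos hg]
        have hfeas : k - st.length ≤ m := by omega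
        rw [← pvAbil_append S _ i hlknoti, ← pvFilter_succ_mem st i h0 hinotst]
        have hih := ih (i+1) st
          ((PySem.List.combinations (PySem.List.pyRange (i+1) N 1) (k - (st.length + 1))).foldl
              (fun b c => pvStep S N b (st ++ i :: c)) best)
          (by omega) (by omega)
          (fun x hx => ⟨(hst x hx).1, by have := (hst x hx).2; omega⟩)
          hfeas
        rw [hih, hr]
      · rw [if_neg hg]
        have hlen : (PySem.List.pyRange (i+1) N 1).length < k - st.length := by
          rw [PySem.List.length_pyRange_one]; omega
        rw [show k - st.length = (k - (st.length + 1)) + 1 from hr] at hlen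
        rw [PySem.List.combinations_eq_nil_of_length_lt _ hlen]
        simp
    · -- start team full: only the link branch
      rw [if_neg hlt]
      have hr : k - st.length = 0 := by omega
      have hg : i - (st.length : Int) < N - (k : Int) := by omega
      rw [if_pos hg]
      rw [← pvAbil_append S _ i hlknoti, ← pvFilter_succ_mem st i h0 hinotst]
      have hih := ih (i+1) st best (by omega) (by omega)
        (fun x hx => ⟨(hst x hx).1, by have := (hst x hx).2; omega⟩)
        (by omega)
      rw [hih, hr, PySem.List.combinations_zero, PySem.List.combinations_zero]

-- ===== VERDICT (by name: the statement is the Claim_ definition above) =====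
theorem solution_spec : Claim_equal_solution := by
  intro S N _dom hpre
  obtain ⟨hN, -⟩ := hpre
  unfold Spec_solution solution solution_alt
  have hfd : PySem.Int.floordiv N 2 = N / 2 :=
    PySem.Int.floordiv_eq_ediv_of_pos (by norm_num)
  have hmain := pvDfs_eq S N (PySem.Int.floordiv N 2).toNat N.toNat 0 [] 100
    (le_refl 0) (by omega) (by intro x hx; simp at hx) (by rw [hfd]; omega)
  rw [PySem.List.pyRange_one_eq_nil (le_refl 0)] at hmain
  simp only [List.filter_nil] at hmain
  have habil0 : pvAbil S [] = 0 := rfl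
  rw [habil0] at hmain
  simp only [List.length_nil, Nat.sub_zero, List.nil_append] at hmain
  rw [show (10 * 10 : Int) = 100 by norm_num]
  rw [hmain]
  exact PySem.List.foldl_congr_mem' _ _ _ _ (fun st _ mn => by simp [pvStep])
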